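-- pv_equiv track=rewrite | github.com/hshk99/Autopack | src/autopack/research/intent_clarification.py | _identify_aspects
-- ===== SOURCE A (Python) =====
-- from typing import Any, Callable, Dict, List, Optional, Protocol
--
-- def _identify_aspects(query: str, concepts: List[str]) -> List[str]:
--     """Identify specific aspects to investigate.
--
--     Args:
--         query: Query string
--         concepts: Key concepts
--
--     Returns:
--         List of clarified aspects
--     """
--     aspects = []
--
--     # Check for common aspect patterns
--     query_lower = query.lower()
--
--     if "best practices" in query_lower:
--         aspects.append("Best practices and standards")
--     if "design" in query_lower:
--         aspects.append("Design patterns and architecture")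
--     if "performance" in query_lower or "optimization" in query_lower:
--         aspects.append("Performance optimization")
--     if "security" in query_lower:
--         aspects.append("Security considerations")
--     if "implementation" in query_lower or "how to" in query_lower:
--         aspects.append("Implementation approaches")
--     if "comparison" in query_lower or "vs" in query_lower:
--         aspects.append("Comparative analysis")
--
--     # If no specific aspects found, use concepts
--     if not aspects:
--         aspects = [f"{concept} fundamentals" for concept in concepts[:3]]
--
--     return aspects[:5]  # Limit to 5 aspects
-- ===== SOURCE B (Python) =====
-- _LABELS = [
--     "Best practices and standards",
--     "Design patterns and architecture",
--     "Performance optimization",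
--     "Security considerations",
--     "Implementation approaches",
--     "Comparative analysis",
-- ]
--
-- _KEYWORDS = [
--     ("best practices", 0),
--     ("design", 1),
--     ("performance", 2),
--     ("optimization", 2),
--     ("security", 3),
--     ("implementation", 4),
--     ("how to", 4),
--     ("comparison", 5),
--     ("vs", 5),
-- ]
--
--
-- def _identify_aspects(query, concepts):
--     """Single scan over the query text: at each position record which keyword
--     matches, collecting a set of aspect indices, then emit labels by index."""
--     ql = query.lower()
--     hit = set()
--     for i in range(len(ql)):
--         for kw, idx in _KEYWORDS:
--             if ql.startswith(kw, i):
--                 hit.add(idx)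
--     aspects = [label for idx, label in enumerate(_LABELS) if idx in hit]
--     if not aspects:
--         aspects = [c + " fundamentals" for c in concepts[:3]]
--     return aspects[:5]
-- ===== Notes on version B (the rewrite author's own statement) =====
-- stated objective: alternative
-- what changed: Instead of six per-keyword substring-containment tests appending labels in order, B makes one scan over the lowered query, checking at each position which keywords start there, accumulating a set of aspect indices, and then emits labels by filtering an enumerated label table against that set; fallback and [:5] cap unchanged.
import Mathlib
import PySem

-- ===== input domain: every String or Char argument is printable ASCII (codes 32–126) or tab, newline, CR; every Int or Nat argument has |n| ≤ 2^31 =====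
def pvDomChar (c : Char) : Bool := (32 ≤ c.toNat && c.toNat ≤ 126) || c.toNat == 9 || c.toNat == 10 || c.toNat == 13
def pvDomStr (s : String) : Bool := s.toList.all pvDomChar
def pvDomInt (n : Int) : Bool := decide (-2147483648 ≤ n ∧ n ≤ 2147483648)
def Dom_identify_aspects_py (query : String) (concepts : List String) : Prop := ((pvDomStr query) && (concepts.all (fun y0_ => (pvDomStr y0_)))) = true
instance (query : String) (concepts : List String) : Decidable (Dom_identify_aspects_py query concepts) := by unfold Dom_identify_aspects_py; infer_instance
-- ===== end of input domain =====

-- B replaces A's six per-keyword containment tests with a single positional scan of the query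
-- collecting a set of matched aspect indices, then emits labels by filtering an enumerated table (alternative; same cost).


-- ===== PORT A =====
def identify_aspects_py (query : String) (concepts : List String) : List String :=
  let query_lower := PySem.Str.lower query
  let aspects : List String := []
  let aspects := if PySem.Str.isIn "best practices" query_lower then aspects ++ ["Best practices and standards"] else aspects
  let aspects := if PySem.Str.isIn "design" query_lower then aspects ++ ["Design patterns and architecture"] else aspects
  let aspects := if PySem.Str.isIn "performance" query_lower || PySem.Str.isIn "optimization" query_lower then aspects ++ ["Performance optimization"] else aspects
  let aspects := if PySem.Str.isIn "security" query_lower then aspects ++ ["Security considerations"] else aspects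
  let aspects := if PySem.Str.isIn "implementation" query_lower || PySem.Str.isIn "how to" query_lower then aspects ++ ["Implementation approaches"] else aspects
  let aspects := if PySem.Str.isIn "comparison" query_lower || PySem.Str.isIn "vs" query_lower then aspects ++ ["Comparative analysis"] else aspects
  let aspects := if aspects = [] then (PySem.List.slice concepts none (some 3)).map (fun concept => concept ++ " fundamentals") else aspects
  PySem.List.slice aspects none (some 5)

-- ===== PORT B =====
def aspectLabels : List String :=
  [ "Best practices and standards"
  , "Design patterns and architecture"
  , "Performance optimization"
  , "Security considerations"
  , "Implementation approaches"
  , "Comparative analysis" ]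

def aspectKeywords : List (String × Int) :=
  [ ("best practices", 0), ("design", 1), ("performance", 2), ("optimization", 2)
  , ("security", 3), ("implementation", 4), ("how to", 4), ("comparison", 5), ("vs", 5) ]

-- the double loop 'for i in range(len(ql)): for kw, idx in _KEYWORDS: if ql.startswith(kw, i): hit.add(idx)';
-- ql.startswith(kw, i) with 0 ≤ i is exactly: kw is a prefix of ql[i:] (hand-ported, exact on that range).
def hitFold (l : List Char) : PySem.Set Int :=
  (List.range l.length).foldl
    (fun h i => aspectKeywords.foldl
      (fun h kv => if PySem.Chars.startswith (l.drop i) kv.1.toList then PySem.Set.add h kv.2 else h) h)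
    PySem.Set.empty

def identify_aspects_py_alt (query : String) (concepts : List String) : List String :=
  let ql := PySem.Str.lower query
  let hit : PySem.Set Int := hitFold ql.toList
  let aspects := ((PySem.List.enumerate aspectLabels).filter
      (fun p => PySem.Set.contains hit p.1)).map (fun p => p.2)
  let aspects := if aspects = [] then (PySem.List.slice concepts none (some 3)).map (fun c => c ++ " fundamentals") else aspects
  PySem.List.slice aspects none (some 5)

-- ===== PRECONDITION & SPEC =====
def Spec_identify_aspects_py (query : String) (concepts : List String) (out : List String) : Prop := out = identify_aspects_py_alt query concepts
instance (query : String) (concepts : List String) (out : List String) : Decidable (Spec_identify_aspects_py query concepts out) := by unfold Spec_identify_aspects_py; infer_instance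

-- ===== CLAIM =====
def Claim_equal_identify_aspects_py : Prop := ∀ (query : String) (concepts : List String), Dom_identify_aspects_py query concepts → Spec_identify_aspects_py query concepts (identify_aspects_py query concepts)

-- ===== LEMMAS AND PROOFS =====

-- membership in the inner keyword-marking fold
lemma mem_mark_fold (l : List Char) (i : Nat) (kws : List (String × Int)) (h : PySem.Set Int) (y : Int) :
    y ∈ kws.foldl (fun h kv => if PySem.Chars.startswith (l.drop i) kv.1.toList then PySem.Set.add h kv.2 else h) h ↔
    y ∈ h ∨ ∃ kv ∈ kws, PySem.Chars.startswith (l.drop i) kv.1.toList = true ∧ y = kv.2 := by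
  induction kws generalizing h with
  | nil => simp
  | cons kv rest ih =>
    simp only [List.foldl_cons, List.mem_cons]
    by_cases hs : PySem.Chars.startswith (l.drop i) kv.1.toList = true
    · rw [if_pos hs, ih, PySem.Set.mem_add]
      constructor
      · rintro ((hy | hy) | ⟨kv', hkv', hp⟩)
        · exact Or.inl hy
        · exact Or.inr ⟨kv, Or.inl rfl, hs, hy⟩
        · exact Or.inr ⟨kv', Or.inr hkv', hp⟩
      · rintro (hy | ⟨kv', (rfl | hkv'), hp, hy⟩)
        · exact Or.inl (Or.inl hy)
        · exact Or.inl (Or.inr hy)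
        · exact Or.inr ⟨kv', hkv', hp, hy⟩
    · rw [if_neg hs, ih]
      constructor
      · rintro (hy | ⟨kv', hkv', hp⟩)
        · exact Or.inl hy
        · exact Or.inr ⟨kv', Or.inr hkv', hp⟩
      · rintro (hy | ⟨kv', (rfl | hkv'), hp, hy⟩)
        · exact Or.inl hy
        · exact (hs hp).elim
        · exact Or.inr ⟨kv', hkv', hp, hy⟩

-- membership in the outer position fold
lemma mem_pos_fold (l : List Char) (is : List Nat) (h : PySem.Set Int) (y : Int) :
    y ∈ is.foldl
      (fun h i => aspectKeywords.foldl
        (fun h kv => if PySem.Chars.startswith (l.drop i) kv.1.toList then PySem.Set.add h kv.2 else h) h) h ↔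
    y ∈ h ∨ ∃ i ∈ is, ∃ kv ∈ aspectKeywords, PySem.Chars.startswith (l.drop i) kv.1.toList = true ∧ y = kv.2 := by
  induction is generalizing h with
  | nil => simp
  | cons i rest ih =>
    simp only [List.foldl_cons, List.mem_cons]
    rw [ih, mem_mark_fold]
    constructor
    · rintro ((hy | ⟨kv, hkv, hp⟩) | ⟨i', hi', hrest⟩)
      · exact Or.inl hy
      · exact Or.inr ⟨i, Or.inl rfl, kv, hkv, hp⟩
      · exact Or.inr ⟨i', Or.inr hi', hrest⟩
    · rintro (hy | ⟨i', (rfl | hi'), hrest⟩)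
      · exact Or.inl (Or.inl hy)
      · exact Or.inl (Or.inr hrest)
      · exact Or.inr ⟨i', hi', hrest⟩

-- for a nonempty keyword, a start position inside the text exists iff the keyword occurs as a substring
lemma exists_start_iff_isIn (l kw : List Char) (hkw : kw ≠ []) :
    (∃ i ∈ List.range l.length, PySem.Chars.startswith (l.drop i) kw = true) ↔
    PySem.Chars.isIn kw l = true := by
  rw [← PySem.Chars.exists_prefix_drop_iff_isIn]
  simp only [List.mem_range, PySem.Chars.startswith_iff]
  constructor
  · rintro ⟨i, _, hp⟩; exact ⟨i, hp⟩
  · rintro ⟨j, hp⟩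
    by_cases hj : j < l.length
    · exact ⟨j, hj, hp⟩
    · exfalso
      rw [List.drop_eq_nil_of_le (le_of_not_gt hj), List.prefix_nil] at hp
      exact hkw hp

-- the collected set contains k iff some keyword mapped to k occurs in the text
lemma contains_hit (l : List Char) (k : Int) :
    PySem.Set.contains (hitFold l) k
      = decide (∃ kv ∈ aspectKeywords, PySem.Chars.isIn kv.1.toList l = true ∧ k = kv.2) := by
  rw [Bool.eq_iff_iff, PySem.Set.contains_iff, decide_eq_true_iff]
  unfold hitFold
  rw [mem_pos_fold]
  constructor
  · rintro (hy | ⟨i, hi, kv, hkv, hp, hy⟩)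
    · simp [PySem.Set.empty] at hy
    · refine ⟨kv, hkv, ?_, hy⟩
      have hkwne : kv.1.toList ≠ [] := by fin_cases hkv <;> decide
      exact (exists_start_iff_isIn l kv.1.toList hkwne).mp ⟨i, hi, hp⟩
  · rintro ⟨kv, hkv, hin, hy⟩
    have hkwne : kv.1.toList ≠ [] := by fin_cases hkv <;> decide
    obtain ⟨i, hi, hp⟩ := (exists_start_iff_isIn l kv.1.toList hkwne).mpr hin
    exact Or.inr ⟨i, hi, kv, hkv, hp, hy⟩

lemma contains0 (l : List Char) : PySem.Set.contains (hitFold l) 0 = PySem.Chars.isIn "best practices".toList l := by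
  rw [contains_hit]; simp [aspectKeywords]
lemma contains1 (l : List Char) : PySem.Set.contains (hitFold l) 1 = PySem.Chars.isIn "design".toList l := by
  rw [contains_hit]; simp [aspectKeywords]
lemma contains2 (l : List Char) : PySem.Set.contains (hitFold l) 2 = (PySem.Chars.isIn "performance".toList l || PySem.Chars.isIn "optimization".toList l) := by
  rw [contains_hit]; simp [aspectKeywords]
lemma contains3 (l : List Char) : PySem.Set.contains (hitFold l) 3 = PySem.Chars.isIn "security".toList l := by
  rw [contains_hit]; simp [aspectKeywords]
lemma contains4 (l : List Char) : PySem.Set.contains (hitFold l) 4 = (PySem.Chars.isIn "implementation".toList l || PySem.Chars.isIn "how to".toList l) := by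
  rw [contains_hit]; simp [aspectKeywords]
lemma contains5 (l : List Char) : PySem.Set.contains (hitFold l) 5 = (PySem.Chars.isIn "comparison".toList l || PySem.Chars.isIn "vs".toList l) := by
  rw [contains_hit]; simp [aspectKeywords]

lemma enum_labels : PySem.List.enumerate aspectLabels =
    [ ((0 : Int), "Best practices and standards"), (1, "Design patterns and architecture")
    , (2, "Performance optimization"), (3, "Security considerations")
    , (4, "Implementation approaches"), (5, "Comparative analysis") ] := rfl

-- ===== VERDICT =====
set_option maxHeartbeats 2000000 in
theorem identify_aspects_py_spec : Claim_equal_identify_aspects_py := by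
  intro query concepts _
  unfold Spec_identify_aspects_py identify_aspects_py identify_aspects_py_alt
  simp only [PySem.Str.isIn_eq, enum_labels, List.filter_cons, List.filter_nil]
  simp only [contains0, contains1, contains2, contains3, contains4, contains5]
  rcases Bool.eq_false_or_eq_true (PySem.Chars.isIn "best practices".toList (PySem.Str.lower query).toList) with c0 | c0 <;>
  rcases Bool.eq_false_or_eq_true (PySem.Chars.isIn "design".toList (PySem.Str.lower query).toList) with c1 | c1 <;>
  rcases Bool.eq_false_or_eq_true (PySem.Chars.isIn "performance".toList (PySem.Str.lower query).toList || PySem.Chars.isIn "optimization".toList (PySem.Str.lower query).toList) with c2 | c2 <;>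
  rcases Bool.eq_false_or_eq_true (PySem.Chars.isIn "security".toList (PySem.Str.lower query).toList) with c3 | c3 <;>
  rcases Bool.eq_false_or_eq_true (PySem.Chars.isIn "implementation".toList (PySem.Str.lower query).toList || PySem.Chars.isIn "how to".toList (PySem.Str.lower query).toList) with c4 | c4 <;>
  rcases Bool.eq_false_or_eq_true (PySem.Chars.isIn "comparison".toList (PySem.Str.lower query).toList || PySem.Chars.isIn "vs".toList (PySem.Str.lower query).toList) with c5 | c5 <;>
  simp only [c0, c1, c2, c3, c4, c5] <;>
  rfl
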